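-- pv_equiv track=rewrite | github.com/lbrandwo/bioinformatics | code/motifs.py | compute_skew
-- ===== SOURCE A (Python) =====
-- def compute_skew(genome):
--     """
--     Computes the skew (#G - #C) for every position in the genome.
--
--     Parameters:
--     genome (str): The genome sequence.
--
--     Returns:
--     list: Skew values for each position in the genome.
--     """
--     skew = [0]
--     for i in range(len(genome)):
--         if genome[i] == 'G':
--             skew.append(skew[-1] + 1)
--         elif genome[i] == 'C':
--             skew.append(skew[-1] - 1)
--         else:
--             skew.append(skew[-1])
--     return skew
-- ===== SOURCE B (Python) =====
-- def compute_skew(genome):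
--     # Sparse event-list algorithm: record only the G/C positions with their
--     # +1/-1 deltas, then fill the constant runs between events by replication.
--     events = [(i, 1 if ch == 'G' else -1)
--               for i, ch in enumerate(genome) if ch in ('G', 'C')]
--     out = []
--     val = 0
--     prev = 0
--     for i, d in events:
--         out.extend([val] * (i - prev + 1))
--         val += d
--         prev = i + 1
--     out.extend([val] * (len(genome) - prev + 1))
--     return out
-- ===== Notes on version B (the rewrite author's own statement) =====
-- stated objective: alternative
-- what changed: Replaces A's per-character branch-and-append running sum (reading skew[-1] each step) with a sparse event-list algorithm: collect only the (position, +/-1) events for G/C characters, then build the output by replicating each constant value over the run between consecutive events.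
import Mathlib
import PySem

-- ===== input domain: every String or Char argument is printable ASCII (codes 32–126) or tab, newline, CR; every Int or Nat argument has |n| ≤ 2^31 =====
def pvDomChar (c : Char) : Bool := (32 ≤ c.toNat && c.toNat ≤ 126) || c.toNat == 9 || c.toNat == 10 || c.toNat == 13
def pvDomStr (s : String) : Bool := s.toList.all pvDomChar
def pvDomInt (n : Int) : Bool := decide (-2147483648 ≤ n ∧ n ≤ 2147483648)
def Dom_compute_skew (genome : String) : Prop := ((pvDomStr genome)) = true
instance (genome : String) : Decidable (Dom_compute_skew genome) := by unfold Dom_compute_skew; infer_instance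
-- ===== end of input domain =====

-- B replaces A's per-character branch-and-append running sum with a sparse event list (G/C positions with ±1 deltas) whose constant runs are filled by replication; alternative decomposition, same O(n) cost.


-- ===== PORT A =====
-- one iteration of A's loop body: branch on the current character, append skew[-1]±1 / skew[-1]
def skewStepA (skew : List Int) (c : Char) : List Int :=
  if c = 'G' then skew ++ [PySem.List.pyGetD skew (-1) 0 + 1]
  else if c = 'C' then skew ++ [PySem.List.pyGetD skew (-1) 0 - 1]
  else skew ++ [PySem.List.pyGetD skew (-1) 0]

def compute_skew (genome : String) : List Int :=
  (PySem.List.pyRange 0 (genome.toList.length : Int) 1).foldl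
    (fun skew i => skewStepA skew (PySem.List.pyGetD genome.toList i ' ')) [0]

-- ===== PORT B =====
-- the comprehension's element: (i, 1 if ch == 'G' else -1) kept iff ch in ('G', 'C')
def skewEvent (p : Int × Char) : Option (Int × Int) :=
  if p.2 = 'G' ∨ p.2 = 'C' then some (p.1, if p.2 = 'G' then (1 : Int) else -1) else none

-- one iteration of B's run-filling loop: state is (out, val, prev)
def skewStepB (st : List Int × Int × Int) (e : Int × Int) : List Int × Int × Int :=
  (st.1 ++ List.replicate (e.1 - st.2.2 + 1).toNat st.2.1, st.2.1 + e.2, e.1 + 1)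

def compute_skew_alt (genome : String) : List Int :=
  let events := (PySem.List.enumerate genome.toList 0).filterMap skewEvent
  let st := events.foldl skewStepB ([], 0, 0)
  st.1 ++ List.replicate ((genome.toList.length : Int) - st.2.2 + 1).toNat st.2.1

-- ===== PRECONDITION & SPEC =====
def Spec_compute_skew (genome : String) (out : List Int) : Prop := out = compute_skew_alt genome
instance (genome : String) (out : List Int) : Decidable (Spec_compute_skew genome out) := by unfold Spec_compute_skew; infer_instance

-- ===== CLAIM (what is proved, stated in full; the proofs are below) =====
def Claim_equal_compute_skew : Prop := ∀ (genome : String), Dom_compute_skew genome → Spec_compute_skew genome (compute_skew genome)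

-- ===== LEMMAS AND PROOFS =====

-- the per-character delta; both ports' behaviour reduces to a scanl of these
def skewDelta (c : Char) : Int := if c = 'G' then 1 else if c = 'C' then -1 else 0

lemma skewStepA_eq (skew : List Int) (c : Char) :
    skewStepA skew c = skew ++ [PySem.List.pyGetD skew (-1) 0 + skewDelta c] := by
  unfold skewStepA skewDelta
  split_ifs <;> simp [sub_eq_add_neg]

lemma scanl_head_tail (b : Int) (l : List Int) :
    List.scanl (· + ·) b l = b :: (List.scanl (· + ·) b l).tail := by
  cases l <;> simp [List.scanl_nil, List.scanl_cons]

lemma skew_loopA_eq (cs : List Char) :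
    ∀ (s : List Int), s ≠ [] →
      cs.foldl skewStepA s
        = s ++ (List.scanl (· + ·) (PySem.List.pyGetD s (-1) 0) (cs.map skewDelta)).tail := by
  induction cs with
  | nil => intro s hs; simp [List.scanl]
  | cons c cs ih =>
      intro s hs
      have hstep := skewStepA_eq s c
      have hne : s ++ [PySem.List.pyGetD s (-1) 0 + skewDelta c] ≠ [] := by simp
      have hlast : PySem.List.pyGetD (s ++ [PySem.List.pyGetD s (-1) 0 + skewDelta c]) (-1) 0
          = PySem.List.pyGetD s (-1) 0 + skewDelta c :=
        PySem.List.pyGetD_neg_one_append_singleton s _ 0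
      calc (c :: cs).foldl skewStepA s
          = cs.foldl skewStepA (s ++ [PySem.List.pyGetD s (-1) 0 + skewDelta c]) := by
            simp [List.foldl, hstep]
        _ = (s ++ [PySem.List.pyGetD s (-1) 0 + skewDelta c])
              ++ (List.scanl (· + ·) (PySem.List.pyGetD s (-1) 0 + skewDelta c)
                    (cs.map skewDelta)).tail := by
            rw [ih _ hne, hlast]
        _ = s ++ (List.scanl (· + ·) (PySem.List.pyGetD s (-1) 0)
                    ((c :: cs).map skewDelta)).tail := by
            rw [List.map_cons, List.scanl_cons]
            rw [List.append_assoc]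
            congr 1
            rw [List.tail_cons]
            exact (scanl_head_tail _ _).symm

-- A's port equals the scanl of per-character deltas
lemma compute_skew_eq_scanl (genome : String) :
    compute_skew genome = List.scanl (· + ·) 0 (genome.toList.map skewDelta) := by
  unfold compute_skew
  rw [PySem.List.foldl_pyRange_zero_pyGetD' genome.toList ' '
        skewStepA [0]]
  rw [skew_loopA_eq genome.toList [0] (by simp)]
  have h0 : PySem.List.pyGetD ([0] : List Int) (-1) 0 = 0 := by decide
  rw [h0]
  conv_rhs => rw [scanl_head_tail 0 (genome.toList.map skewDelta)]
  simp

-- B-side invariant: folding the run-filling step over the events of cs (indices from s),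
-- starting from prev = p ≤ s, and closing the final run up to position s + |cs|,
-- yields the pending run of v's followed by the scanl of the deltas.
lemma skew_loopB_eq (cs : List Char) :
    ∀ (s p v : Int) (out : List Int), p ≤ s →
      (let st := ((PySem.List.enumerate cs s).filterMap skewEvent).foldl skewStepB (out, v, p)
       st.1 ++ List.replicate ((s + (cs.length : Int)) - st.2.2 + 1).toNat st.2.1)
        = out ++ List.replicate (s - p).toNat v ++ List.scanl (· + ·) v (cs.map skewDelta) := by
  induction cs with
  | nil =>
      intro s p v out hps
      have h2 : (s - p + 1).toNat = (s - p).toNat + 1 := by omega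
      simp [PySem.List.enumerate_nil, List.scanl_nil, h2, List.replicate_succ']
  | cons c cs ih =>
      intro s p v out hps
      rw [PySem.List.enumerate_cons]
      by_cases hGC : c = 'G' ∨ c = 'C'
      · -- c is an event: one run of v's up to position s is emitted, val becomes v + δ c
        have hev : skewEvent (s, c) = some (s, skewDelta c) := by
          rcases hGC with h | h <;> subst h <;> simp [skewEvent, skewDelta]
        have hδ : skewDelta c = if c = 'G' then (1:Int) else -1 := by
          rcases hGC with h | h <;> subst h <;> simp [skewDelta]
        rw [List.filterMap_cons, hev]
        simp only [List.foldl_cons]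
        have hstep : skewStepB (out, v, p) (s, skewDelta c)
            = (out ++ List.replicate (s - p + 1).toNat v, v + skewDelta c, s + 1) := by
          simp [skewStepB]
        rw [hstep]
        have := ih (s + 1) (s + 1) (v + skewDelta c)
          (out ++ List.replicate (s - p + 1).toNat v) le_rfl
        simp only at this
        have hlen : (s + 1) + (cs.length : Int) = s + ((cs.length : Int) + 1) := by ring
        rw [show s + ((c :: cs).length : Int) = (s + 1) + (cs.length : Int) by
              simp; ring]
        rw [this]
        have hrep : (s - p + 1).toNat = (s - p).toNat + 1 := by omega
        simp [hrep, List.replicate_succ', List.scanl_cons, List.append_assoc]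
      · -- c is not an event: nothing emitted, the pending run grows by one position
        have hev : skewEvent (s, c) = none := by simp [skewEvent, hGC]
        have hδ : skewDelta c = 0 := by
          unfold skewDelta
          rcases not_or.mp hGC with ⟨h1, h2⟩
          simp [h1, h2]
        rw [List.filterMap_cons, hev]
        have := ih (s + 1) p v out (by omega)
        simp only at this
        rw [show s + ((c :: cs).length : Int) = (s + 1) + (cs.length : Int) by
              simp; ring]
        rw [this]
        have hrep : (s + 1 - p).toNat = (s - p).toNat + 1 := by omega
        simp [hδ, hrep, List.replicate_succ', List.scanl_cons, List.append_assoc]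

-- B's port equals the same scanl
lemma compute_skew_alt_eq_scanl (genome : String) :
    compute_skew_alt genome = List.scanl (· + ·) 0 (genome.toList.map skewDelta) := by
  unfold compute_skew_alt
  have := skew_loopB_eq genome.toList 0 0 0 [] le_rfl
  simp only at this
  simpa using this

-- ===== VERDICT (by name: the statement is the Claim_ definition above) =====
theorem compute_skew_spec : Claim_equal_compute_skew := by
  intro genome _
  unfold Spec_compute_skew
  rw [compute_skew_eq_scanl, compute_skew_alt_eq_scanl]
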